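-- pv_equiv track=rewrite | github.com/mays126/Exam | credit_card.py | get_nuber
-- ===== SOURCE A (Python) =====
-- def get_nuber(number: str):
--     str_len = len(number)
--     new_number = '' #номер карты после выполнения функции
--     for i in range(str_len):
--         if i >= str_len - 4:
--             new_number = new_number + number[i]
--         elif number[i] == ' ':
--             new_number = new_number + ' '
--         else:                                                       # если i равно последним четырём цифрам то записываем их
--             new_number = new_number + '*'                           # иначе записываем *
--
--
--     return new_number
-- ===== SOURCE B (Python) =====
-- def get_nuber(number: str):
--     out = []
--     keep = 4
--     for c in reversed(number):
--         if keep > 0: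
--             out.append(c)
--             keep -= 1
--         else:
--             out.append(c if c == ' ' else '*')
--     out.reverse()
--     return ''.join(out)
-- ===== Notes on version B (the rewrite author's own statement) =====
-- stated objective: alternative
-- what changed: Traverses the string back-to-front with a countdown counter of 4 characters to keep (no length-based index test per character), appending to a list and reversing once, instead of A's forward index loop comparing each index against len-4 with repeated string concatenation.
import Mathlib
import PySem

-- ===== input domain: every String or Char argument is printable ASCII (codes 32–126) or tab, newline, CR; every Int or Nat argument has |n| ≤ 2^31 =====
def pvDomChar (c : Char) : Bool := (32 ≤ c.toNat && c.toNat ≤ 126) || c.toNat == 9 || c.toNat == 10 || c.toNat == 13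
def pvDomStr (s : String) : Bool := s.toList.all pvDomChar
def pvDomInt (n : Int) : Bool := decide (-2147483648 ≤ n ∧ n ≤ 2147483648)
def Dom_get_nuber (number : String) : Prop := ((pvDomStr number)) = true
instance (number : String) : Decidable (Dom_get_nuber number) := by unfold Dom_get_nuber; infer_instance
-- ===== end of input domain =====

-- B walks the string back-to-front with a countdown counter of 4 kept characters
-- (list append + one final reverse), instead of A's forward index loop testing each
-- index against len-4 with repeated string concatenation (alternative decomposition).

-- ===== PORT A =====
def get_nuber (number : String) : String :=
  let cs := number.toList
  let str_len : Int := cs.length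
  let new_number : List Char :=
    (PySem.List.pyRange 0 str_len 1).foldl (fun acc i =>
      if i ≥ str_len - 4 then acc ++ [PySem.List.pyGetD cs i ' ']
      else if PySem.List.pyGetD cs i ' ' = ' ' then acc ++ [' ']
      else acc ++ ['*']) []
  String.ofList new_number

-- ===== PORT B =====
def get_nuber_alt (number : String) : String :=
  let st := number.toList.reverse.foldl
    (fun (st : List Char × Int) c =>
      if st.2 > 0 then (st.1 ++ [c], st.2 - 1)
      else (st.1 ++ [if c = ' ' then ' ' else '*'], st.2))
    ([], 4)
  String.ofList st.1.reverse

-- ===== PRECONDITION & SPEC =====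
def Spec_get_nuber (number : String) (out : String) : Prop := out = get_nuber_alt number
instance (number : String) (out : String) : Decidable (Spec_get_nuber number out) := by unfold Spec_get_nuber; infer_instance

-- ===== CLAIM (what is proved, stated in full; the proofs are below) =====
def Claim_equal_get_nuber : Prop := ∀ (number : String), Dom_get_nuber number → Spec_get_nuber number (get_nuber number)

-- ===== LEMMAS AND PROOFS =====

-- A's loop, as a map over indices, equals mask-the-prefix ++ keep-the-suffix.
lemma get_nuber_key (cs : List Char) :
    (List.range cs.length).map (fun (k : Nat) =>
        if (((k : Nat) : Int) ≥ (cs.length : Int) - 4) then cs.getD k ' '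
        else if cs.getD k ' ' = ' ' then ' ' else '*')
      = (cs.take (cs.length - 4)).map (fun c => if c = ' ' then ' ' else '*')
        ++ cs.drop (cs.length - 4) := by
  apply List.ext_getElem
  · simp
  · intro k hk hk'
    simp only [List.length_map, List.length_range] at hk
    by_cases h : k < cs.length - 4
    · have hi : ¬ (((k : Nat) : Int) ≥ (cs.length : Int) - 4) := by omega
      rw [List.getElem_append_left (by simp; omega)]
      simp only [List.getElem_map, List.getElem_range, List.getElem_take]
      rw [if_neg hi, List.getD_eq_getElem _ _ hk]
    · have hi : (((k : Nat) : Int) ≥ (cs.length : Int) - 4) := by omega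
      rw [List.getElem_append_right (by simp; omega)]
      simp only [List.getElem_map, List.getElem_range, List.getElem_drop]
      rw [if_pos hi, List.getD_eq_getElem _ _ hk]
      congr 1
      simp
      omega

-- B's countdown fold characterised: keep the first k chars, mask the rest.
lemma get_nuber_fold (l acc : List Char) (k : Nat) :
    (l.foldl (fun (st : List Char × Int) c =>
      if st.2 > 0 then (st.1 ++ [c], st.2 - 1)
      else (st.1 ++ [if c = ' ' then ' ' else '*'], st.2)) (acc, (k : Int))).1
    = acc ++ l.take k ++ (l.drop k).map (fun c => if c = ' ' then ' ' else '*') := by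
  induction l generalizing acc k with
  | nil => simp
  | cons c t ih =>
    cases k with
    | zero =>
      simp only [List.foldl_cons]
      rw [if_neg (by norm_num)]
      simpa using ih (acc ++ [if c = ' ' then ' ' else '*']) 0
    | succ k' =>
      simp only [List.foldl_cons]
      rw [if_pos (by exact_mod_cast Nat.succ_pos k')]
      have : ((Nat.succ k' : Int)) - 1 = (k' : Int) := by push_cast; ring
      rw [this]
      simpa using ih (acc ++ [c]) k'

-- ===== VERDICT (by name: the statement is the Claim_ definition above) =====
theorem get_nuber_spec : Claim_equal_get_nuber := by
  intro number _
  unfold Spec_get_nuber get_nuber get_nuber_alt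
  set cs := number.toList with hcs
  simp only []
  -- A side → canonical form
  have hfun : (fun (acc : List Char) (i : Int) =>
      if i ≥ (cs.length : Int) - 4 then acc ++ [PySem.List.pyGetD cs i ' ']
      else if PySem.List.pyGetD cs i ' ' = ' ' then acc ++ [' ']
      else acc ++ ['*'])
      = fun (acc : List Char) (i : Int) =>
          acc ++ [if i ≥ (cs.length : Int) - 4 then PySem.List.pyGetD cs i ' '
                  else if PySem.List.pyGetD cs i ' ' = ' ' then ' ' else '*'] := by
    funext acc i; split_ifs <;> rfl
  rw [hfun, PySem.List.foldl_append_singleton_eq_map, List.nil_append]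
  rw [show ((cs.length : Int)) = ((cs.length : Nat) : Int) from rfl]
  rw [PySem.List.pyRange_zero_natCast, List.map_map]
  have hA : (List.range cs.length).map
      ((fun i : Int => if i ≥ ((cs.length : Nat) : Int) - 4 then PySem.List.pyGetD cs i ' '
          else if PySem.List.pyGetD cs i ' ' = ' ' then ' ' else '*') ∘ (fun k : Nat => (k : Int)))
      = (cs.take (cs.length - 4)).map (fun c => if c = ' ' then ' ' else '*')
        ++ cs.drop (cs.length - 4) := by
    rw [← get_nuber_key cs]
    apply List.map_congr_left
    intro k hk
    simp [Function.comp, PySem.List.pyGetD_natCast]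
  rw [hA]
  -- B side → same canonical form
  have hB := get_nuber_fold cs.reverse [] 4
  norm_cast at hB
  rw [hB, List.nil_append]
  congr 1
  simp [List.reverse_append, ← List.map_reverse, List.drop_reverse, List.take_reverse]
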